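-- pv_equiv track=rewrite | github.com/csy1998/YORO | nonautoregressive/gec_inference.py | edit_sentence
-- ===== SOURCE A (Python) =====
-- def edit_sentence(source, edits):
--     # build edit dict
--     edit_dict = dict()
--     edit_poses = []
--     for edit in edits:
--         etype, pos, char = edit
--         edit_poses.append(pos)
--         if pos not in edit_dict:
--             edit_dict[pos] = {
--                 "del": False,
--                 "add": []
--             }
--         if etype == "delete":
--             edit_dict[pos]["del"] = True
--         elif etype == "add":
--             edit_dict[pos]["add"].append(char)
--
--     # predict
--     predict = []
--     for origin_index in range(len(source) + 1):  # plus 1: may add at last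
--         if origin_index not in edit_dict:
--             if origin_index < len(source):
--                 predict.append(source[origin_index])
--             continue
--         edits = edit_dict[origin_index]
--         predict.extend(edits["add"])
--         if not edits["del"] and origin_index < len(source):
--             predict.append(source[origin_index])
--         origin_index += 1
--
--     return predict
-- ===== SOURCE B (Python) =====
-- def edit_sentence(source, edits):
--     # One pass over positions, scanning the flat edit list at each position
--     # (no intermediate dict of per-position records).
--     n = len(source)
--     out = []
--     for i in range(n + 1):
--         deleted = False
--         for etype, pos, char in edits:
--             if pos == i:
--                 if etype == "add":
--                     out.append(char)
--                 elif etype == "delete":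
--                     deleted = True
--         if i < n and not deleted:
--             out.append(source[i])
--     return out
-- ===== Notes on version B (the rewrite author's own statement) =====
-- stated objective: simpler
-- what changed: B drops A's intermediate per-position dict of {del, add} records and instead, for each output position, scans the flat edit list directly, collecting added chars and a delete flag on the fly.
import Mathlib
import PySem

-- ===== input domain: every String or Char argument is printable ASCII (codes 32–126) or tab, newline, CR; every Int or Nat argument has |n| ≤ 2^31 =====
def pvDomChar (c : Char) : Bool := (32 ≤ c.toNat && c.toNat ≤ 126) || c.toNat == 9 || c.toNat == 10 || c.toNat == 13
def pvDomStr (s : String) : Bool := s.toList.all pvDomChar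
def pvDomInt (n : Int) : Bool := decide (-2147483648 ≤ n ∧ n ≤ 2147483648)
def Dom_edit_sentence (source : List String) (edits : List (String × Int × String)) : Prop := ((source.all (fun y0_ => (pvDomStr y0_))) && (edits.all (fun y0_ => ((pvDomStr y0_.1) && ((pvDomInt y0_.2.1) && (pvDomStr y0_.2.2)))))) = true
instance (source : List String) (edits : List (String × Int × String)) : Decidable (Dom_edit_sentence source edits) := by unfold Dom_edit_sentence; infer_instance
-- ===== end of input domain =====

-- B replaces A's per-position dict of {del, add} records by a direct scan of the flat
-- edit list at each position (simpler: no intermediate index structure); same return value.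

-- ===== PORT A =====
-- one step of A's dict-building loop; the inner {"del": …, "add": …} dict is ported as a
-- (Bool × List String) pair (its two fixed keys)
def pvBuildStep (d : PySem.Dict Int (Bool × List String)) (e : String × Int × String) :
    PySem.Dict Int (Bool × List String) :=
  let d := if d.contains e.2.1 = false then d.insert e.2.1 (false, []) else d
  if e.1 = "delete" then d.modify e.2.1 (false, []) (fun v => (true, v.2))
  else if e.1 = "add" then d.modify e.2.1 (false, []) (fun v => (v.1, v.2 ++ [e.2.2]))
  else d

-- (A's 'edit_poses' list is built but never used; it is omitted.)
def edit_sentence (source : List String) (edits : List (String × Int × String)) : List String :=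
  let ed := edits.foldl pvBuildStep PySem.Dict.empty
  -- source[origin_index] is always in range in both branches, so pyGetD is exact here
  (PySem.List.pyRange 0 ((source.length : Int) + 1)).foldl (fun predict oi =>
    if ed.contains oi = false then
      if oi < (source.length : Int) then predict ++ [PySem.List.pyGetD source oi ""] else predict
    else
      let es := ed.getD oi (false, [])
      let predict := predict ++ es.2
      if es.1 = false ∧ oi < (source.length : Int) then
        predict ++ [PySem.List.pyGetD source oi ""]
      else predict) []

-- ===== PORT B =====
def edit_sentence_alt (source : List String) (edits : List (String × Int × String)) : List String :=
  (List.range (source.length + 1)).foldl (fun (out : List String) (i : Nat) =>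
    let s := edits.foldl (fun (s : List String × Bool) e =>
        if e.2.1 = (i : Int) then
          if e.1 = "add" then (s.1 ++ [e.2.2], s.2)
          else if e.1 = "delete" then (s.1, true)
          else s
        else s) (out, false)
    if i < source.length ∧ s.2 = false then s.1 ++ [source.getD i ""] else s.1) []

-- ===== PRECONDITION & SPEC =====
def Spec_edit_sentence (source : List String) (edits : List (String × Int × String)) (out : List String) : Prop := out = edit_sentence_alt source edits
instance (source : List String) (edits : List (String × Int × String)) (out : List String) : Decidable (Spec_edit_sentence source edits out) := by unfold Spec_edit_sentence; infer_instance

-- ===== CLAIM (what is proved, stated in full; the proofs are below) =====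
def Claim_equal_edit_sentence : Prop := ∀ (source : List String) (edits : List (String × Int × String)), Dom_edit_sentence source edits → Spec_edit_sentence source edits (edit_sentence source edits)

-- ===== LEMMAS AND PROOFS =====

-- what both programs record at a position k: is there any edit, any delete, and the added chars
def pvHas (edits : List (String × Int × String)) (k : Int) : Bool :=
  edits.any (fun e => e.2.1 == k)
def pvDel (edits : List (String × Int × String)) (k : Int) : Bool :=
  edits.any (fun e => e.2.1 == k && e.1 == "delete")
def pvAdds (edits : List (String × Int × String)) (k : Int) : List String :=
  (edits.filter (fun e => e.2.1 == k && e.1 == "add")).map (fun e => e.2.2)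

theorem buildStep_contains (d : PySem.Dict Int (Bool × List String))
    (e : String × Int × String) (k : Int) :
    (pvBuildStep d e).contains k = (e.2.1 == k || d.contains k) := by
  have hbk : (k == e.2.1) = (e.2.1 == k) := Bool.beq_comm
  dsimp only [pvBuildStep]
  by_cases hdl : e.1 = "delete"
  · rw [if_pos hdl, PySem.Dict.contains_modify, hbk]
    split_ifs <;> simp [PySem.Dict.contains_insert, hbk] <;>
      cases h : (e.2.1 == k) <;> simp_all
  · by_cases ha : e.1 = "add"
    · rw [if_neg hdl, if_pos ha, PySem.Dict.contains_modify, hbk]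
      split_ifs <;> simp [PySem.Dict.contains_insert, hbk] <;>
        cases h : (e.2.1 == k) <;> simp_all
    · rw [if_neg hdl, if_neg ha]
      split_ifs with hc
      · rw [PySem.Dict.contains_insert, hbk]
      · cases h : (e.2.1 == k)
        · simp
        · simp only [Bool.true_or]
          simp only [beq_iff_eq] at h
          subst h
          simpa using hc

theorem build_contains (l : List (String × Int × String))
    (d : PySem.Dict Int (Bool × List String)) (k : Int) :
    (l.foldl pvBuildStep d).contains k = (d.contains k || pvHas l k) := by
  induction l generalizing d with
  | nil => simp [pvHas]
  | cons e t ih =>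
    simp only [List.foldl_cons, ih, pvHas, List.any_cons, buildStep_contains]
    cases d.contains k <;> cases h : (e.2.1 == k) <;> simp [pvHas]

theorem buildStep_getD (d : PySem.Dict Int (Bool × List String))
    (e : String × Int × String) (k : Int) :
    (pvBuildStep d e).getD k (false, []) =
      (if k = e.2.1 then
        (if e.1 = "delete" then ((true : Bool), (d.getD k (false, [])).2)
         else if e.1 = "add" then ((d.getD k (false, [])).1, (d.getD k (false, [])).2 ++ [e.2.2])
         else d.getD k (false, []))
       else d.getD k (false, [])) := by
  have hbase : ∀ j, (if d.contains e.2.1 = false then d.insert e.2.1 (false, []) else d).getD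
      j (false, []) = d.getD j (false, []) := by
    intro j
    split_ifs with hc
    · rw [PySem.Dict.getD_insert]
      split_ifs with hj
      · subst hj; rw [PySem.Dict.getD_of_not_contains d _ hc]
      · rfl
    · rfl
  dsimp only [pvBuildStep]
  by_cases hdl : e.1 = "delete"
  · rw [if_pos hdl, PySem.Dict.getD_modify, hbase, hbase]
    split_ifs with hj <;> simp [hdl, hj]
  · by_cases ha : e.1 = "add"
    · rw [if_neg hdl, if_pos ha, PySem.Dict.getD_modify, hbase, hbase]
      split_ifs with hj <;> simp [hdl, ha, hj]
    · rw [if_neg hdl, if_neg ha, hbase]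
      split_ifs with hj <;> simp [hdl, ha, hj]

theorem build_getD (l : List (String × Int × String))
    (d : PySem.Dict Int (Bool × List String)) (k : Int) :
    (l.foldl pvBuildStep d).getD k (false, []) =
      (((d.getD k (false, [])).1 || pvDel l k), (d.getD k (false, [])).2 ++ pvAdds l k) := by
  induction l generalizing d with
  | nil => simp [pvDel, pvAdds]
  | cons e t ih =>
    rw [List.foldl_cons, ih, buildStep_getD]
    have hDel : pvDel (e :: t) k = ((e.2.1 == k && e.1 == "delete") || pvDel t k) := by
      simp [pvDel]
    have hAdds : pvAdds (e :: t) k =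
        (if e.2.1 == k && e.1 == "add" then e.2.2 :: pvAdds t k else pvAdds t k) := by
      simp only [pvAdds, List.filter_cons]
      split_ifs <;> simp_all
    rw [hDel, hAdds]
    by_cases hk : k = e.2.1
    · subst hk
      by_cases hdl : e.1 = "delete"
      · simp [hdl]
      · have hfd : (e.1 == "delete") = false := beq_eq_false_iff_ne.mpr hdl
        by_cases ha : e.1 = "add"
        · simp [ha, hfd]
        · have hfa : (e.1 == "add") = false := beq_eq_false_iff_ne.mpr ha
          simp [hdl, ha, hfd, hfa]
    · have hfk : (e.2.1 == k) = false := beq_eq_false_iff_ne.mpr (fun h => hk h.symm)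
      simp [hk, hfk]

theorem innerB (edits : List (String × Int × String)) (i : Int)
    (out : List String) (b : Bool) :
    edits.foldl (fun (s : List String × Bool) e =>
        if e.2.1 = i then
          if e.1 = "add" then (s.1 ++ [e.2.2], s.2)
          else if e.1 = "delete" then (s.1, true)
          else s
        else s) (out, b) = (out ++ pvAdds edits i, b || pvDel edits i) := by
  induction edits generalizing out b with
  | nil => simp [pvAdds, pvDel]
  | cons e t ih =>
    simp only [List.foldl_cons]
    by_cases hk : e.2.1 = i
    · by_cases ha : e.1 = "add"
      · rw [if_pos hk, if_pos ha, ih]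
        simp [pvAdds, pvDel, List.filter_cons, hk, ha]
      · by_cases hdl : e.1 = "delete"
        · rw [if_pos hk, if_neg ha, if_pos hdl, ih]
          simp [pvAdds, pvDel, List.filter_cons, hk, ha, hdl]
        · rw [if_pos hk, if_neg ha, if_neg hdl, ih]
          have hfd : (e.1 == "delete") = false := beq_eq_false_iff_ne.mpr hdl
          simp [pvAdds, pvDel, hk, ha, hfd]
    · rw [if_neg hk, ih]
      have hfk : (e.2.1 == i) = false := beq_eq_false_iff_ne.mpr hk
      simp [pvAdds, pvDel, hfk]

theorem pvHas_false_del (edits : List (String × Int × String)) (k : Int)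
    (h : pvHas edits k = false) : pvDel edits k = false := by
  simp only [pvHas, List.any_eq_false] at h
  simp only [pvDel, List.any_eq_false]
  intro e he
  simp [h e he]

theorem pvHas_false_adds (edits : List (String × Int × String)) (k : Int)
    (h : pvHas edits k = false) : pvAdds edits k = [] := by
  simp only [pvHas, List.any_eq_false] at h
  simp only [pvAdds, List.map_eq_nil_iff, List.filter_eq_nil_iff]
  intro e he
  simp [h e he]

-- ===== VERDICT (by name: the statement is the Claim_ definition above) =====
theorem edit_sentence_spec : Claim_equal_edit_sentence := by
  intro source edits _
  unfold Spec_edit_sentence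
  dsimp only [edit_sentence, edit_sentence_alt]
  have hr : PySem.List.pyRange 0 ((source.length : Int) + 1) =
      (List.range (source.length + 1)).map (fun k : Nat => (k : Int)) := by
    rw [show ((source.length : Int) + 1) = ((source.length + 1 : Nat) : Int) by push_cast; ring]
    exact PySem.List.pyRange_zero_natCast _
  rw [hr, List.foldl_map]
  refine PySem.List.foldl_congr_mem _ _ _ _ ?_
  intro acc i _
  have hilt : ((i : Int) < (source.length : Int)) ↔ i < source.length := by exact_mod_cast Iff.rfl
  rw [innerB]
  by_cases hc : pvHas edits (i : Int) = false
  · rw [show (edits.foldl pvBuildStep PySem.Dict.empty).contains (i : Int) = false by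
      rw [build_contains]; simp [hc]]
    rw [pvHas_false_del _ _ hc, pvHas_false_adds _ _ hc]
    by_cases hl : i < source.length
    · simp [hl, hilt.mpr hl, PySem.List.pyGetD_natCast]
    · simp [hl]
  · have hc' : (edits.foldl pvBuildStep PySem.Dict.empty).contains (i : Int) = true := by
      rw [build_contains]; simp_all [Bool.not_eq_false]
    rw [hc']
    rw [if_neg (by simp)]
    rw [build_getD]
    simp only [PySem.Dict.getD_empty, Bool.false_or, List.nil_append]
    by_cases hdl : pvDel edits (i : Int) = false <;>
      by_cases hl : i < source.length <;>
      simp_all [PySem.List.pyGetD_natCast]
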